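-- pv_equiv track=rewrite | github.com/Algorithm-bbackgongdan/Almut-3rd | code/itsnowkim/week1/boj_21758.py | partial_sum
-- ===== SOURCE A (Python) =====
-- def partial_sum(arr):
--     # bee1's temp summation
--     bee1_ans = sum(arr) - arr[0]
--     ans = 0
--
--     # adjust bee2
--     for i in range(1, (len(arr)-1)):
--         temp_ans = bee1_ans - arr[i] + sum(arr[i+1:])
--
--         if temp_ans > ans:
--             ans = temp_ans
--
--     return ans
-- ===== SOURCE B (Python) =====
-- def partial_sum(arr):
--     base = sum(arr) - arr[0]
--     ans = 0
--     suffix = 0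
--     for i in range(len(arr) - 2, 0, -1):
--         suffix += arr[i + 1]
--         cand = base - arr[i] + suffix
--         if cand > ans:
--             ans = cand
--     return ans
-- ===== Notes on version B (the rewrite author's own statement) =====
-- stated objective: faster
-- what changed: Replaced the per-candidate sum(arr[i+1:]) inside the loop by a running suffix sum maintained in a single reverse pass, computing each candidate in O(1).
-- outside the precondition, e.g. on partial_sum([]): A raises IndexError, B raises IndexError
import Mathlib
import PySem

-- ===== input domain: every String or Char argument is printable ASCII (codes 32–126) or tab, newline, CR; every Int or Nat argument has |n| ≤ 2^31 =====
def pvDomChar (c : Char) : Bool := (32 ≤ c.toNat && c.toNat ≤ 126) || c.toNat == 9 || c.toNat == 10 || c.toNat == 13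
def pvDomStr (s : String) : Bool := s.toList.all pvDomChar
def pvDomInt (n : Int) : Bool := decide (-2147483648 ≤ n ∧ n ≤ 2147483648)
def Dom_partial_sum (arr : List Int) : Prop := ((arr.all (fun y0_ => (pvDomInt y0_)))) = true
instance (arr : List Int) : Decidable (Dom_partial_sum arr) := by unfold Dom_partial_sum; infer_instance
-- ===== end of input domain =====

-- B replaces A's O(n^2) inner sum(arr[i+1:]) by a running suffix sum maintained in a single
-- reverse pass (objective: faster, asymptotic O(n) vs O(n^2)).


-- ===== PORT A =====
-- arr[0] / arr[i] / arr[i+1:] ported with PySem.List.pyGetD / slice; pyGetD's default is never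
-- used inside Pre_ (arr ≠ [] and loop indices are in range).
def partial_sum (arr : List Int) : Int :=
  let bee1_ans : Int := arr.sum - PySem.List.pyGetD arr 0 0
  (PySem.List.pyRange 1 ((arr.length : Int) - 1) 1).foldl
    (fun ans i =>
      let temp_ans := bee1_ans - PySem.List.pyGetD arr i 0 + (PySem.List.slice arr (some (i + 1)) none).sum
      if temp_ans > ans then temp_ans else ans) 0

-- ===== PORT B =====
-- one reverse pass; state = (ans, running suffix sum)
def partial_sum_alt (arr : List Int) : Int :=
  let base : Int := arr.sum - PySem.List.pyGetD arr 0 0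
  let st := (PySem.List.pyRange ((arr.length : Int) - 2) 0 (-1)).foldl
    (fun (p : Int × Int) i =>
      let suffix := p.2 + PySem.List.pyGetD arr (i + 1) 0
      let cand := base - PySem.List.pyGetD arr i 0 + suffix
      (if cand > p.1 then cand else p.1, suffix)) (0, 0)
  st.1

-- ===== PRECONDITION & SPEC =====
-- Pre_ excludes only the empty list, on which Python A raises IndexError at arr[0].
def Pre_partial_sum (arr : List Int) : Prop := arr ≠ []
instance (arr : List Int) : Decidable (Pre_partial_sum arr) := by unfold Pre_partial_sum; infer_instance
def pvWitness_partial_sum : List Int := [1, 2, 3]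

def Spec_partial_sum (arr : List Int) (out : Int) : Prop := out = partial_sum_alt arr
instance (arr : List Int) (out : Int) : Decidable (Spec_partial_sum arr out) := by unfold Spec_partial_sum; infer_instance

-- ===== CLAIM (what is proved, stated in full; the proofs are below) =====
def Claim_equal_partial_sum : Prop := ∀ (arr : List Int), Dom_partial_sum arr → Pre_partial_sum arr → Spec_partial_sum arr (partial_sum arr)

-- ===== LEMMAS AND PROOFS =====

-- the common candidate value at (in-range) index i
def pvCand (arr : List Int) (i : Int) : Int :=
  (arr.sum - PySem.List.pyGetD arr 0 0) - PySem.List.pyGetD arr i 0 + (arr.drop (i.toNat + 1)).sum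

theorem pvIf_max (a t : Int) : (if t > a then t else a) = max a t := by
  rcases le_or_gt t a with h | h
  · simp [max_eq_left h]; omega
  · simp [max_eq_right (le_of_lt h), h]

-- A's loop is a running max of pvCand over range(1, n-1)
theorem pvA_eq (arr : List Int) :
    partial_sum arr
      = (PySem.List.pyRange 1 ((arr.length : Int) - 1) 1).foldl (fun a i => max a (pvCand arr i)) 0 := by
  unfold partial_sum
  apply PySem.List.foldl_congr_mem
  intro acc i hi
  rw [PySem.List.mem_pyRange_one] at hi
  have h1 : (0 : Int) ≤ i + 1 := by omega
  have h2 : (i + 1).toNat = i.toNat + 1 := by omega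
  simp only [PySem.List.slice_from arr h1, h2, pvIf_max, pvCand]

-- B's loop invariant: starting the suffix accumulator at sum(drop (m+2)), the countdown from m
-- computes the same running max of pvCand, and the suffix ends at sum(drop 2).
theorem pvB_inv (arr : List Int) (m : Nat) (hm : m + 2 ≤ arr.length) (a : Int) :
    (PySem.List.pyRange (m : Int) 0 (-1)).foldl
      (fun (p : Int × Int) i =>
        let suffix := p.2 + PySem.List.pyGetD arr (i + 1) 0
        let cand := (arr.sum - PySem.List.pyGetD arr 0 0) - PySem.List.pyGetD arr i 0 + suffix
        (if cand > p.1 then cand else p.1, suffix)) (a, (arr.drop (m + 2)).sum)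
      = ((PySem.List.pyRange (m : Int) 0 (-1)).foldl (fun x i => max x (pvCand arr i)) a,
         (arr.drop 2).sum) := by
  induction m generalizing a with
  | zero =>
    rw [PySem.List.pyRange_neg_one_eq_nil (by omega)]
    simp
  | succ k ih =>
    rw [PySem.List.pyRange_neg_one_cons (by exact_mod_cast Nat.cast_pos.mpr (Nat.succ_pos k) : (0:Int) < ((k+1 : Nat) : Int))]
    have hidx : ((k + 1 : Nat) : Int) + 1 = ((k + 2 : Nat) : Int) := by omega
    have hlt : k + 2 < arr.length := by omega
    have hsuf : (arr.drop (k + 1 + 2)).sum + PySem.List.pyGetD arr (((k + 1 : Nat) : Int) + 1) 0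
        = (arr.drop (k + 2)).sum := by
      rw [hidx, PySem.List.pyGetD_natCast, List.getD_eq_getElem _ _ hlt,
        List.drop_eq_getElem_cons hlt, List.sum_cons,
        show k + 1 + 2 = k + 2 + 1 from by omega]
      exact add_comm _ _
    have hcand : (arr.sum - PySem.List.pyGetD arr 0 0) - PySem.List.pyGetD arr ((k + 1 : Nat) : Int) 0
          + (arr.drop (k + 2)).sum = pvCand arr ((k + 1 : Nat) : Int) := by
      simp [pvCand]
    have hcast : ((k + 1 : Nat) : Int) - 1 = (k : Int) := by omega
    simp only [List.foldl_cons, hsuf, hcand, hcast]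
    rw [pvIf_max a (pvCand arr ((k + 1 : Nat) : Int))]
    exact ih (by omega) (max a (pvCand arr ((k + 1 : Nat) : Int)))

theorem pvB_eq (arr : List Int) :
    partial_sum_alt arr
      = (PySem.List.pyRange ((arr.length : Int) - 2) 0 (-1)).foldl (fun a i => max a (pvCand arr i)) 0 := by
  unfold partial_sum_alt
  rcases Nat.lt_or_ge arr.length 2 with h2 | h2
  · rw [PySem.List.pyRange_neg_one_eq_nil (by omega)]
    simp
  · obtain ⟨m, hm⟩ : ∃ m, arr.length = m + 2 := ⟨arr.length - 2, by omega⟩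
    have key := pvB_inv arr m (by omega) 0
    have hd : arr.drop (m + 2) = [] := List.drop_eq_nil_of_le (by omega)
    rw [hd, List.sum_nil] at key
    have hms : ((arr.length : Int) - 2) = (m : Int) := by
      rw [hm]; omega
    simp only [hms]
    rw [key]

-- ===== VERDICT (by name: the statement is the Claim_ definition above) =====
theorem partial_sum_spec : Claim_equal_partial_sum := by
  intro arr _ _
  unfold Spec_partial_sum
  rw [pvA_eq, pvB_eq arr]
  have hrev : PySem.List.pyRange ((arr.length : Int) - 2) 0 (-1)
      = (PySem.List.pyRange 1 ((arr.length : Int) - 1) 1).reverse := by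
    have e1 : (0 : Int) + 1 = 1 := by omega
    have e2 : ((arr.length : Int) - 2) + 1 = (arr.length : Int) - 1 := by omega
    rw [PySem.List.pyRange_neg_one_eq_reverse, e1, e2]
  rw [hrev]
  exact ((PySem.List.pyRange 1 ((arr.length : Int) - 1) 1).reverse_perm.foldl_eq
    (rcomm := ⟨fun a i j => max_right_comm a (pvCand arr i) (pvCand arr j)⟩) 0).symm
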